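-- pv_equiv track=rewrite | github.com/juliarzymowska/WDI | lesson_programs/zad56.py | different_digits
-- ===== SOURCE A (Python) =====
-- def different_digits(number : int) -> bool:
--     check = [False for _ in range(10)]
--
--     while number > 0:
--         if check[number%10]:
--             return False
--         #end if
--         check[number%10] = True
--         number //= 10
--     #end while
--
--     return True
-- ===== SOURCE B (Python) =====
-- def different_digits(number : int) -> bool:
--     digits = []
--     while number > 0:
--         digits.append(number % 10)
--         number //= 10
--     digits.sort()
--     return all(digits[i] != digits[i + 1] for i in range(len(digits) - 1))
-- ===== Notes on version B (the rewrite author's own statement) =====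
-- stated objective: alternative
-- what changed: Replaces A's single pass with a per-digit seen-array and early exit by a sort-then-scan: collect all digits unconditionally, sort them, then verify no two adjacent sorted digits are equal.
import Mathlib
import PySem

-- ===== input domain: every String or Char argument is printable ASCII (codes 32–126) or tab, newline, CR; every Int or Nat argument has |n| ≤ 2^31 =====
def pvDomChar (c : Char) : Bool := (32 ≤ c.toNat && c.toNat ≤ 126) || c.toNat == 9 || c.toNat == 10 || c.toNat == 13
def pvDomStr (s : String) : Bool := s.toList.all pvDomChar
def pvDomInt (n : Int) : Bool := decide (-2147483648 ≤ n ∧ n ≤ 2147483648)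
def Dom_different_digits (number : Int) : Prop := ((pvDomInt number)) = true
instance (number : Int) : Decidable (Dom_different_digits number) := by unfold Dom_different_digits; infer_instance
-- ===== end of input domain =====

-- B replaces A's seen-array single pass by a sort-then-scan: collect the digits, sort
-- them, and check that no two adjacent sorted digits are equal (alternative algorithm).

-- termination helper (cited by the ports' decreasing_by)
theorem pv_floordiv10_lt (n : Int) (h : 0 < n) :
    (PySem.Int.floordiv n 10).toNat < n.toNat := by
  rw [PySem.Int.floordiv_eq_ediv_of_pos (by norm_num)]
  omega

-- ===== PORT A =====
-- the while loop of A: state = (number, check); early return False becomes result false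
def ddLoopA (number : Int) (check : List Bool) : Bool :=
  if h : 0 < number then
    if PySem.List.pyGetD check (PySem.Int.mod number 10) false then false
    else ddLoopA (PySem.Int.floordiv number 10)
           (PySem.List.pySetD check (PySem.Int.mod number 10) true)
  else true
termination_by number.toNat
decreasing_by exact pv_floordiv10_lt number h

def different_digits (number : Int) : Bool :=
  ddLoopA number (List.replicate 10 false)

-- ===== PORT B =====
-- the while loop of B: appends number % 10, no branch
def ddLoopB (number : Int) (digits : List Int) : List Int :=
  if h : 0 < number then
    ddLoopB (PySem.Int.floordiv number 10) (digits ++ [PySem.Int.mod number 10])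
  else digits
termination_by number.toNat
decreasing_by exact pv_floordiv10_lt number h

def different_digits_alt (number : Int) : Bool :=
  let digits := ddLoopB number []
  let s := PySem.List.sorted digits (fun x => x) false     -- digits.sort()
  -- all(s[i] != s[i+1] for i in range(len(s) - 1))
  (PySem.List.pyRange 0 ((s.length : Int) - 1) 1).all
    (fun i => PySem.List.pyGetD s i 0 != PySem.List.pyGetD s (i + 1) 0)

-- ===== PRECONDITION & SPEC =====
def Spec_different_digits (number : Int) (out : Bool) : Prop := out = different_digits_alt number
instance (number : Int) (out : Bool) : Decidable (Spec_different_digits number out) := by unfold Spec_different_digits; infer_instance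

-- ===== CLAIM (what is proved, stated in full; the proofs are below) =====
def Claim_equal_different_digits : Prop := ∀ (number : Int), Dom_different_digits number → Spec_different_digits number (different_digits number)

-- ===== LEMMAS AND PROOFS =====

-- the pure digit list (low-to-high) both loops traverse
def pvDigits (n : Int) : List Int :=
  if h : 0 < n then PySem.Int.mod n 10 :: pvDigits (PySem.Int.floordiv n 10)
  else []
termination_by n.toNat
decreasing_by exact pv_floordiv10_lt n h

theorem pvDigits_mem_bounds (n : Int) : ∀ e ∈ pvDigits n, 0 ≤ e ∧ e < 10 := by
  intro e he
  induction n using pvDigits.induct with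
  | case1 n h ih =>
    rw [pvDigits, dif_pos h] at he
    rcases List.mem_cons.mp he with he | he
    · subst he
      rw [PySem.Int.mod_eq_emod_of_pos (by norm_num)]
      omega
    · exact ih he
  | case2 n h => rw [pvDigits, dif_neg h] at he; cases he

theorem ddLoopB_eq (n : Int) (acc : List Int) : ddLoopB n acc = acc ++ pvDigits n := by
  induction n using pvDigits.induct generalizing acc with
  | case1 n h ih =>
    rw [ddLoopB, dif_pos h, pvDigits, dif_pos h, ih]
    simp
  | case2 n h => rw [ddLoopB, dif_neg h, pvDigits, dif_neg h]; simp

-- the adjacent-neq scan equals Chain' (· ≠ ·)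
theorem pv_adjScan_iff (s : List Int) :
    ((PySem.List.pyRange 0 ((s.length : Int) - 1) 1).all
      (fun i => PySem.List.pyGetD s i 0 != PySem.List.pyGetD s (i + 1) 0)) = true ↔
    List.IsChain (· ≠ ·) s := by
  rw [List.all_eq_true, List.isChain_iff_getElem]
  constructor
  · intro h i hi
    have hm : (i : Int) ∈ PySem.List.pyRange 0 ((s.length : Int) - 1) 1 := by
      rw [PySem.List.mem_pyRange_one]; omega
    have := h _ hm
    rw [PySem.List.pyGetD_natCast s i 0,
        show ((i : Int) + 1) = ((i + 1 : Nat) : Int) by push_cast; ring,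
        PySem.List.pyGetD_natCast s (i + 1) 0] at this
    simp only [List.getD_eq_getElem?_getD, List.getElem?_eq_getElem (by omega : i < s.length),
      List.getElem?_eq_getElem hi, Option.getD_some, bne_iff_ne, ne_eq] at this
    exact this
  · intro h i hm
    rw [PySem.List.mem_pyRange_one] at hm
    have hi0 : 0 ≤ i := hm.1
    obtain ⟨k, rfl⟩ : ∃ k : Nat, i = (k : Int) := ⟨i.toNat, (Int.toNat_of_nonneg hi0).symm⟩
    have hk : k + 1 < s.length := by omega
    have := h k hk
    rw [PySem.List.pyGetD_natCast s k 0,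
        show ((k : Int) + 1) = ((k + 1 : Nat) : Int) by push_cast; ring,
        PySem.List.pyGetD_natCast s (k + 1) 0]
    simp only [List.getD_eq_getElem?_getD, List.getElem?_eq_getElem (by omega : k < s.length),
      List.getElem?_eq_getElem hk, Option.getD_some, bne_iff_ne, ne_eq]
    exact this

-- on a ≤-sorted list, adjacent distinctness is exactly Nodup
theorem pv_sorted_chain_ne_iff_nodup (s : List Int) (hs : s.Pairwise (· ≤ ·)) :
    List.IsChain (· ≠ ·) s ↔ s.Nodup := by
  constructor
  · intro hc
    have hlt : List.IsChain (· < ·) s := by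
      rw [List.isChain_iff_getElem] at hc ⊢
      have hle := (List.pairwise_iff_getElem).mp hs
      intro i hi
      exact lt_of_le_of_ne (hle i (i+1) (by omega) hi (by omega)) (hc i hi)
    have := (List.isChain_iff_pairwise).mp hlt
    exact this.imp (fun h => ne_of_lt h)
  · intro hnd
    exact List.Pairwise.isChain hnd

theorem pv_alt_eq (n : Int) : different_digits_alt n = decide (pvDigits n).Nodup := by
  unfold different_digits_alt
  rw [ddLoopB_eq]
  simp only [List.nil_append]
  set s := PySem.List.sorted (pvDigits n) (fun x => x) false with hsdef
  have hperm : s.Perm (pvDigits n) := PySem.List.sorted_perm _ _ _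
  have hpw : s.Pairwise (· ≤ ·) := by
    have := PySem.List.sorted_pairwise (xs := pvDigits n) (key := fun x => x)
    simpa using this
  have hiff : ((PySem.List.pyRange 0 ((s.length : Int) - 1) 1).all
      (fun i => PySem.List.pyGetD s i 0 != PySem.List.pyGetD s (i + 1) 0)) = true ↔
      (pvDigits n).Nodup := by
    rw [pv_adjScan_iff, pv_sorted_chain_ne_iff_nodup s hpw]
    exact hperm.nodup_iff
  rcases hb : ((PySem.List.pyRange 0 ((s.length : Int) - 1) 1).all
      (fun i => PySem.List.pyGetD s i 0 != PySem.List.pyGetD s (i + 1) 0)) with _ | _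
  · rw [hb] at hiff
    have hn : ¬ (pvDigits n).Nodup := fun hnd => by simpa using hiff.mpr hnd
    simp [hn]
  · rw [hb] at hiff
    simp [hiff.mp rfl]

-- A's loop returns true iff the remaining digits are distinct and none is marked in check
theorem ddLoopA_eq (n : Int) (check : List Bool) (hlen : check.length = 10) :
    ddLoopA n check =
      decide ((pvDigits n).Nodup ∧
        ∀ e ∈ pvDigits n, PySem.List.pyGetD check e false = false) := by
  induction n using pvDigits.induct generalizing check with
  | case2 n h =>
    rw [ddLoopA, dif_neg h, pvDigits, dif_neg h]
    simp
  | case1 n h ih =>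
    rw [ddLoopA, dif_pos h, pvDigits, dif_pos h]
    set d : Int := PySem.Int.mod n 10 with hd
    have hd0 : 0 ≤ d := by rw [hd, PySem.Int.mod_eq_emod_of_pos (by norm_num)]; omega
    have hd10 : d < 10 := by rw [hd, PySem.Int.mod_eq_emod_of_pos (by norm_num)]; omega
    have hdn : d = ((d.toNat : Nat) : Int) := (Int.toNat_of_nonneg hd0).symm
    have hlen' : (PySem.List.pySetD check d true).length = 10 := by
      rw [PySem.List.length_pySetD, hlen]
    have hget : ∀ e : Int, 0 ≤ e → e < 10 →
        PySem.List.pyGetD (PySem.List.pySetD check d true) e false =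
          if e = d then true else PySem.List.pyGetD check e false := by
      intro e he0 he10
      rw [hdn, show e = ((e.toNat : Nat) : Int) from (Int.toNat_of_nonneg he0).symm]
      rw [PySem.List.pyGetD_pySetD_natCast check d.toNat e.toNat true false (by omega)]
      by_cases heq : e.toNat = d.toNat
      · simp [heq]
      · have hne : ¬ ((e.toNat : Int) = (d.toNat : Int)) := by exact_mod_cast heq
        rw [if_neg heq, if_neg hne]
    by_cases hc : PySem.List.pyGetD check d false = true
    · rw [if_pos hc]
      have : ¬ ((d :: pvDigits (PySem.Int.floordiv n 10)).Nodup ∧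
          ∀ e ∈ d :: pvDigits (PySem.Int.floordiv n 10),
            PySem.List.pyGetD check e false = false) := by
        intro ⟨_, hall⟩
        have := hall d (by simp)
        rw [hc] at this; cases this
      simp only [this, decide_false]
    · rw [if_neg hc]
      rw [ih _ hlen']
      rw [decide_eq_decide]
      have hcf : PySem.List.pyGetD check d false = false := by
        cases hx : PySem.List.pyGetD check d false
        · rfl
        · exact absurd hx hc
      constructor
      · intro ⟨hnd, hall⟩
        have hdnot : d ∉ pvDigits (PySem.Int.floordiv n 10) := by
          intro hmem
          have := hall d hmem
          rw [hget d hd0 hd10, if_pos rfl] at this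
          cases this
        refine ⟨List.nodup_cons.mpr ⟨hdnot, hnd⟩, ?_⟩
        intro e he
        rcases List.mem_cons.mp he with he | he
        · exact he ▸ hcf
        · have := hall e he
          have hb := pvDigits_mem_bounds _ e he
          rw [hget e hb.1 hb.2] at this
          split at this
          · cases this
          · exact this
      · intro ⟨hnd, hall⟩
        have hnd' := List.nodup_cons.mp hnd
        refine ⟨hnd'.2, ?_⟩
        intro e he
        have hb := pvDigits_mem_bounds _ e he
        rw [hget e hb.1 hb.2]
        split
        · next heq => exact absurd (heq ▸ he) hnd'.1
        · exact hall e (List.mem_cons_of_mem _ he)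

theorem pv_replicate_get (e : Int) :
    PySem.List.pyGetD (List.replicate 10 false) e false = false := by
  unfold PySem.List.pyGetD
  cases hx : PySem.List.pyGet? (List.replicate 10 false) e with
  | none => rfl
  | some b =>
    have : b ∈ List.replicate 10 false := PySem.List.mem_of_pyGet?_eq_some _ hx
    simp at this
    simp [this]

-- ===== VERDICT (by name: the statement is the Claim_ definition above) =====
theorem different_digits_spec : Claim_equal_different_digits := by
  intro number _
  unfold Spec_different_digits different_digits
  rw [ddLoopA_eq number _ (by simp), pv_alt_eq]
  rw [decide_eq_decide]
  constructor
  · exact fun h => h.1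
  · exact fun h => ⟨h, fun e _ => pv_replicate_get e⟩
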